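-- pv_equiv track=rewrite | github.com/Last1k96/layers-insight | backend/utils/dag_regions.py | _collect_between
-- ===== SOURCE A (Python) =====
-- from collections import defaultdict, deque
--
-- def _collect_between(
--     entry: str,
--     exit_node: str,
--     succ: dict[str, set[str]],
--     pred: dict[str, set[str]],
--     topo_rank: dict[str, int],
-- ) -> set[str]:
--     """Collect all nodes reachable from entry that can also reach exit_node.
--
--     Limited to nodes with topo rank between entry and exit_node so the
--     BFS stays bounded. Uses the precomputed `pred` map for the reverse
--     pass instead of scanning every candidate node.
--     """
--     if entry == exit_node:
--         return {entry}
--     lo = topo_rank.get(entry, 0)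
--     hi = topo_rank.get(exit_node, 10**9)
--     if lo > hi:
--         return set()
--
--     # Forward BFS from entry, restricted to nodes with topo rank <= hi.
--     forward: set[str] = {entry}
--     queue: deque[str] = deque([entry])
--     while queue:
--         n = queue.popleft()
--         for c in succ[n]:
--             if c in forward:
--                 continue
--             if topo_rank.get(c, 10**9) > hi:
--                 continue
--             forward.add(c)
--             queue.append(c)
--
--     if exit_node not in forward:
--         return set()
--
--     # Reverse BFS from exit_node, restricted to the forward set.
--     reachable: set[str] = {exit_node}
--     queue = deque([exit_node])
--     while queue:
--         n = queue.popleft()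
--         for p in pred.get(n, ()):
--             if p in forward and p not in reachable:
--                 reachable.add(p)
--                 queue.append(p)
--     return reachable
-- ===== SOURCE B (Python) =====
-- def _closure(seed, expand):
--     """Least set containing seed and closed under expand, by round iteration."""
--     s = {seed}
--     while True:
--         nxt = s | {y for x in s for y in expand(x)}
--         if nxt == s:
--             return s
--         s = nxt
--
--
-- def _collect_between(
--     entry: str,
--     exit_node: str,
--     succ: dict[str, set[str]],
--     pred: dict[str, set[str]],
--     topo_rank: dict[str, int],
-- ) -> set[str]:
--     """Same result as A: both passes are computed by one generic fixed-point
--     closure helper (round iteration to a stable set) instead of A's two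
--     hand-written deque BFS traversals."""
--     if entry == exit_node:
--         return {entry}
--     hi = topo_rank.get(exit_node, 10**9)
--     if topo_rank.get(entry, 0) > hi:
--         return set()
--
--     forward = _closure(entry, lambda n: [c for c in succ[n]
--                                          if topo_rank.get(c, 10**9) <= hi])
--     if exit_node not in forward:
--         return set()
--     return _closure(exit_node, lambda n: [p for p in pred.get(n, ())
--                                           if p in forward])
-- ===== Notes on version B (the rewrite author's own statement) =====
-- stated objective: alternative
-- what changed: Both passes are computed by one generic fixed-point closure helper (round iteration of the whole set until it stops growing) instead of A's two hand-written deque BFS worklist traversals; the rank filter and the forward-set filter become the two expansion functions passed to it.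
import Mathlib
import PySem

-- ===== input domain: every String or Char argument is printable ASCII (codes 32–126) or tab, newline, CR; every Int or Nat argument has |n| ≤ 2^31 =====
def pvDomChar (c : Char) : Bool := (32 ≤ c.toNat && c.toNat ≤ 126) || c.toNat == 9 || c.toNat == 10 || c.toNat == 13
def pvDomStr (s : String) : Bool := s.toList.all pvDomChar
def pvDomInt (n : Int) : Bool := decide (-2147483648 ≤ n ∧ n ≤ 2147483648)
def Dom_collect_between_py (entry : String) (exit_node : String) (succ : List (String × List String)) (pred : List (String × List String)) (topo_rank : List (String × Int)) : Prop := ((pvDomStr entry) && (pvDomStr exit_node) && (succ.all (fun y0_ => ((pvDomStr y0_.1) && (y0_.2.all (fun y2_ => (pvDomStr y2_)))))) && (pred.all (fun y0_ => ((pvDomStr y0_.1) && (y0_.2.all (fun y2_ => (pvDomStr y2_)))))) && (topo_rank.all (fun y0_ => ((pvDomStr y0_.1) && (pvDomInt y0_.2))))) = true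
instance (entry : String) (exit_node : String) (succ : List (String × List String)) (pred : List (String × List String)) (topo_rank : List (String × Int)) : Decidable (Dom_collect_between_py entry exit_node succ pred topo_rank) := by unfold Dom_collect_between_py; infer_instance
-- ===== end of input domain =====

-- B computes both passes with one generic round-iteration fixed-point closure instead of A's two
-- hand-written deque BFS traversals (alternative decomposition, no speed claim).


-- ===== PORT A =====
-- shared lookup helpers (both ports read the same three Python dicts)
-- d[n] / d.get(n, ()) on an adjacency dict: succ[n] (Pre_ excludes exactly the KeyError inputs)
-- and pred.get(n, ()) (never raises)
def pvAdj (d : List (String × List String)) (n : String) : List String :=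
  PySem.Dict.getD (PySem.Dict.mk d) n []
-- topo_rank.get(c, 10**9)
def pvRank (topo_rank : List (String × Int)) (c : String) : Int :=
  PySem.Dict.getD (PySem.Dict.mk topo_rank) c 1000000000

-- inner 'for c in succ[n]' of A's forward BFS, state = (forward, queue)
def pvFwdStep (succ : List (String × List String)) (topo_rank : List (String × Int)) (hi : Int)
    (st : PySem.Set String × List String) (n : String) : PySem.Set String × List String :=
  (pvAdj succ n).foldl (fun st c =>
    if c ∈ st.1 then st
    else if pvRank topo_rank c > hi then st
    else (PySem.Set.add st.1 c, st.2 ++ [c])) st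

-- 'while queue:' of A's forward BFS (fuel = one unit per pop; the stated fuel provably suffices)
def pvFwdLoop (succ : List (String × List String)) (topo_rank : List (String × Int)) (hi : Int) :
    Nat → PySem.Set String → List String → PySem.Set String
  | 0, fwd, _ => fwd
  | _ + 1, fwd, [] => fwd
  | fuel + 1, fwd, n :: q =>
      let st := pvFwdStep succ topo_rank hi (fwd, q) n
      pvFwdLoop succ topo_rank hi fuel st.1 st.2

-- inner 'for p in pred.get(n, ())' of A's reverse BFS, state = (reachable, queue)
def pvRevStepA (pred : List (String × List String)) (fwd : PySem.Set String)
    (st : PySem.Set String × List String) (n : String) : PySem.Set String × List String :=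
  (pvAdj pred n).foldl (fun st p =>
    if p ∈ fwd then
      if p ∈ st.1 then st else (PySem.Set.add st.1 p, st.2 ++ [p])
    else st) st

-- 'while queue:' of A's reverse BFS
def pvRevLoopA (pred : List (String × List String)) (fwd : PySem.Set String) :
    Nat → PySem.Set String → List String → PySem.Set String
  | 0, r, _ => r
  | _ + 1, r, [] => r
  | fuel + 1, r, n :: q =>
      let st := pvRevStepA pred fwd (r, q) n
      pvRevLoopA pred fwd fuel st.1 st.2

def collect_between_py (entry : String) (exit_node : String) (succ : List (String × List String)) (pred : List (String × List String)) (topo_rank : List (String × Int)) : List String :=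
  if entry = exit_node then [entry]
  else
    let lo := PySem.Dict.getD (PySem.Dict.mk topo_rank) entry 0
    let hi := PySem.Dict.getD (PySem.Dict.mk topo_rank) exit_node 1000000000
    if lo > hi then []
    else
      let fwd := pvFwdLoop succ topo_rank hi ((succ.flatMap Prod.snd).length + 1) [entry] [entry]
      if exit_node ∈ fwd then
        pvRevLoopA pred fwd ((pred.flatMap Prod.snd).length + 1) [exit_node] [exit_node]
      else []

-- ===== PORT B =====
-- B's two expansion lambdas:
-- [c for c in succ[n] if topo_rank.get(c, 10**9) <= hi]
def pvExpandF (succ : List (String × List String)) (topo_rank : List (String × Int)) (hi : Int)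
    (n : String) : List String :=
  (pvAdj succ n).filter (fun c => decide (pvRank topo_rank c ≤ hi))
-- [p for p in pred.get(n, ()) if p in forward]
def pvExpandR (pred : List (String × List String)) (fwd : PySem.Set String)
    (n : String) : List String :=
  (pvAdj pred n).filter (fun p => decide (p ∈ fwd))

-- one round of _closure:  s | {y for x in s for y in expand(x)}
def pvRound (g : String → List String) (s : PySem.Set String) : PySem.Set String :=
  PySem.Set.union s (s.flatMap g)

-- _closure's 'while True: … if nxt == s: return s' (fuel: the stated fuel provably suffices)
def pvKfix (g : String → List String) : Nat → PySem.Set String → PySem.Set String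
  | 0, s => s
  | fuel + 1, s =>
      let nxt := pvRound g s
      if PySem.Set.equal nxt s then s else pvKfix g fuel nxt

def collect_between_py_alt (entry : String) (exit_node : String) (succ : List (String × List String)) (pred : List (String × List String)) (topo_rank : List (String × Int)) : List String :=
  if entry = exit_node then [entry]
  else
    let hi := PySem.Dict.getD (PySem.Dict.mk topo_rank) exit_node 1000000000
    if PySem.Dict.getD (PySem.Dict.mk topo_rank) entry 0 > hi then []
    else
      let forward := pvKfix (pvExpandF succ topo_rank hi) ((succ.flatMap Prod.snd).length + 1) [entry]
      if exit_node ∈ forward then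
        pvKfix (pvExpandR pred forward) ((pred.flatMap Prod.snd).length + 1) [exit_node]
      else []

-- ===== PRECONDITION & SPEC =====
-- Python A raises KeyError exactly when (past the two early returns) the rank-bounded forward
-- closure of entry contains a node that is not a key of succ; Pre_ excludes exactly those raising
-- inputs (B raises the same KeyError there). The closure is a graph property of the input, written
-- as a plain Kleene-iteration formula; the equivalence proof below never uses Pre_ (both ports
-- agree on all of Dom), it only delimits where Python A returns.
def pvReachSet (succ : List (String × List String)) (topo_rank : List (String × Int))
    (hi : Int) (entry : String) : List String :=
  (fun s : List String =>
      PySem.List.dedup (s ++ s.flatMap (fun n =>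
        (pvAdj succ n).filter (fun c => decide (pvRank topo_rank c ≤ hi)))))^[(succ.flatMap Prod.snd).length + 1]
    [entry]

def Pre_collect_between_py (entry : String) (exit_node : String) (succ : List (String × List String)) (pred : List (String × List String)) (topo_rank : List (String × Int)) : Prop :=
  entry = exit_node ∨
  PySem.Dict.getD (PySem.Dict.mk topo_rank) entry 0 > PySem.Dict.getD (PySem.Dict.mk topo_rank) exit_node 1000000000 ∨
  ∀ x ∈ pvReachSet succ topo_rank (PySem.Dict.getD (PySem.Dict.mk topo_rank) exit_node 1000000000) entry,
    (PySem.Dict.mk succ).contains x = true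
instance (entry : String) (exit_node : String) (succ : List (String × List String)) (pred : List (String × List String)) (topo_rank : List (String × Int)) : Decidable (Pre_collect_between_py entry exit_node succ pred topo_rank) := by unfold Pre_collect_between_py; infer_instance

def pvWitness_collect_between_py : String × String × (List (String × List String)) × (List (String × List String)) × (List (String × Int)) :=
  ("a", "b", [("a", ["b"]), ("b", [])], [("b", ["a"])], [("a", 0), ("b", 1)])

def Spec_collect_between_py (entry : String) (exit_node : String) (succ : List (String × List String)) (pred : List (String × List String)) (topo_rank : List (String × Int)) (out : List String) : Prop := out = collect_between_py_alt entry exit_node succ pred topo_rank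
instance (entry : String) (exit_node : String) (succ : List (String × List String)) (pred : List (String × List String)) (topo_rank : List (String × Int)) (out : List String) : Decidable (Spec_collect_between_py entry exit_node succ pred topo_rank out) := by unfold Spec_collect_between_py; infer_instance

-- ===== CLAIM (what is proved, stated in full; the proofs are below) =====
def Claim_equal_collect_between_py : Prop := ∀ (entry : String) (exit_node : String) (succ : List (String × List String)) (pred : List (String × List String)) (topo_rank : List (String × Int)), Dom_collect_between_py entry exit_node succ pred topo_rank → Pre_collect_between_py entry exit_node succ pred topo_rank → Spec_collect_between_py entry exit_node succ pred topo_rank (collect_between_py entry exit_node succ pred topo_rank)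

-- ===== LEMMAS AND PROOFS =====

theorem pv_adj_nil (n : String) : pvAdj [] n = [] := by
  simp [pvAdj, PySem.Dict.getD_eq_get?_getD, PySem.Dict.get?]

theorem pv_adj_cons (k n : String) (v : List String) (rest : List (String × List String)) :
    pvAdj ((k, v) :: rest) n = if k == n then v else pvAdj rest n := by
  simp only [pvAdj, PySem.Dict.getD_eq_get?_getD, PySem.Dict.get?_mk_cons]
  split <;> rfl

theorem pv_adj_subset_flatMap (succ : List (String × List String)) (n x : String)
    (hx : x ∈ pvAdj succ n) : x ∈ succ.flatMap Prod.snd := by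
  induction succ with
  | nil => rw [pv_adj_nil] at hx; cases hx
  | cons p rest ih =>
    obtain ⟨k, v⟩ := p
    rw [pv_adj_cons] at hx
    by_cases hk : (k == n) = true
    · simp only [hk, if_pos] at hx
      simp only [List.flatMap_cons, List.mem_append]
      exact Or.inl hx
    · simp only [hk, if_neg, Bool.false_eq_true, not_false_iff] at hx
      simp only [List.flatMap_cons, List.mem_append]
      exact Or.inr (ih hx)

theorem pv_nodup_append (s t : List String) (hs : s.Nodup) (ht : t.Nodup)
    (hd : ∀ x ∈ t, x ∉ s) : (s ++ t).Nodup := by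
  exact List.Nodup.append hs ht (List.disjoint_right.mpr hd)

-- proof-side canonical step of a worklist BFS: 'if fresh, append to both the set and the queue'
def pvPair (st : List String × List String) (c : String) : List String × List String :=
  if c ∈ st.1 then st else (st.1 ++ [c], st.2 ++ [c])

-- proof-side canonical worklist BFS over an expansion function g
def pvBfsG (g : String → List String) : Nat → List String → List String → List String
  | 0, r, _ => r
  | _ + 1, r, [] => r
  | fuel + 1, r, n :: q =>
      let st := (g n).foldl pvPair (r, q)
      pvBfsG g fuel st.1 st.2

-- expanding a whole block of nodes into the accumulated set
def pvBlock (g : String → List String) (r : List String) (q : List String) : List String :=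
  q.foldl (fun s n => (g n).foldl PySem.Set.add s) r

theorem pv_bfsG_nil (g : String → List String) (fuel : Nat) (r : List String) :
    pvBfsG g fuel r [] = r := by
  cases fuel <;> rfl

-- shape of one inner expansion: the pair fold and the Set.add fold append the same fresh suffix
theorem pv_pair_fold_shape (l : List String) : ∀ (s q : List String),
    ∃ t : List String,
      l.foldl pvPair (s, q) = (s ++ t, q ++ t) ∧
      l.foldl PySem.Set.add s = s ++ t ∧
      t.Nodup ∧ (∀ x ∈ t, x ∈ l ∧ x ∉ s) ∧ (∀ x ∈ l, x ∈ s ++ t) := by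
  induction l with
  | nil =>
    intro s q
    exact ⟨[], by simp, by simp, List.nodup_nil, by simp, by simp⟩
  | cons c l ih =>
    intro s q
    simp only [List.foldl_cons]
    by_cases hc : c ∈ s
    · rw [show pvPair (s, q) c = (s, q) from by simp [pvPair, hc],
        PySem.Set.add_of_mem hc]
      obtain ⟨t, h1, h2, h3, h4, h5⟩ := ih s q
      refine ⟨t, h1, h2, h3,
        fun d hd => ⟨List.mem_cons.mpr (Or.inr (h4 d hd).1), (h4 d hd).2⟩, ?_⟩
      intro d hd
      rcases List.mem_cons.mp hd with hd | hd
      · subst hd; exact List.mem_append_left _ hc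
      · exact h5 d hd
    · rw [show pvPair (s, q) c = (s ++ [c], q ++ [c]) from by simp [pvPair, hc],
        PySem.Set.add_of_not_mem hc]
      obtain ⟨t, h1, h2, h3, h4, h5⟩ := ih (s ++ [c]) (q ++ [c])
      refine ⟨c :: t, ?_, ?_, ?_, ?_, ?_⟩
      · rw [h1]; simp
      · rw [h2]; simp
      · refine List.nodup_cons.mpr ⟨fun hct => ?_, h3⟩
        exact (h4 c hct).2 (List.mem_append_right _ (List.mem_singleton.mpr rfl))
      · intro d hd
        rcases List.mem_cons.mp hd with hd | hd
        · subst hd; exact ⟨List.mem_cons_self, hc⟩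
        · obtain ⟨hd1, hd2⟩ := h4 d hd
          exact ⟨List.mem_cons_of_mem _ hd1, fun hds => hd2 (List.mem_append_left _ hds)⟩
      · intro d hd
        rcases List.mem_cons.mp hd with hd | hd
        · subst hd; exact List.mem_append_right _ List.mem_cons_self
        · have := h5 d hd
          rcases List.mem_append.mp this with h | h
          · rcases List.mem_append.mp h with h | h
            · exact List.mem_append_left _ h
            · rw [List.mem_singleton] at h; subst h
              exact List.mem_append_right _ List.mem_cons_self
          · exact List.mem_append_right _ (List.mem_cons_of_mem _ h)

-- A's forward inner loop is the canonical pair fold over the filtered children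
theorem pv_fwd_inner_eq (topo_rank : List (String × Int)) (hi : Int) (l : List String) :
    ∀ (st : PySem.Set String × List String),
      l.foldl (fun st c =>
        if c ∈ st.1 then st
        else if pvRank topo_rank c > hi then st
        else (PySem.Set.add st.1 c, st.2 ++ [c])) st
      = (l.filter (fun c => decide (pvRank topo_rank c ≤ hi))).foldl pvPair st := by
  induction l with
  | nil => intro st; rfl
  | cons c l ih =>
    intro st
    simp only [List.foldl_cons, List.filter_cons]
    by_cases hr : pvRank topo_rank c ≤ hi
    · simp only [hr, decide_true, if_true, List.foldl_cons]
      by_cases hc : c ∈ st.1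
      · rw [if_pos hc, show pvPair st c = st from by simp [pvPair, hc]]
        exact ih st
      · rw [if_neg hc, if_neg (not_lt.mpr hr),
          show pvPair st c = (st.1 ++ [c], st.2 ++ [c]) from by simp [pvPair, hc],
          PySem.Set.add_of_not_mem hc]
        exact ih _
    · simp only [hr, decide_false]
      by_cases hc : c ∈ st.1
      · rw [if_pos hc]; exact ih st
      · rw [if_neg hc, if_pos (lt_of_not_ge hr)]; exact ih st

-- A's reverse inner loop is the canonical pair fold over the filtered predecessors
theorem pv_rev_inner_eq (fwd : PySem.Set String) (l : List String) :
    ∀ (st : PySem.Set String × List String),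
      l.foldl (fun st p =>
        if p ∈ fwd then
          if p ∈ st.1 then st else (PySem.Set.add st.1 p, st.2 ++ [p])
        else st) st
      = (l.filter (fun p => decide (p ∈ fwd))).foldl pvPair st := by
  induction l with
  | nil => intro st; rfl
  | cons p l ih =>
    intro st
    simp only [List.foldl_cons, List.filter_cons]
    by_cases hf : p ∈ fwd
    · simp only [hf, decide_true, if_true, List.foldl_cons]
      by_cases hc : p ∈ st.1
      · rw [if_pos hc, show pvPair st p = st from by simp [pvPair, hc]]
        exact ih st
      · rw [if_neg hc,
          show pvPair st p = (st.1 ++ [p], st.2 ++ [p]) from by simp [pvPair, hc],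
          PySem.Set.add_of_not_mem hc]
        exact ih _
    · simp only [hf, decide_false, Bool.false_eq_true, if_false]
      exact ih st

-- A's two loops are the canonical BFS over the corresponding expansion functions
theorem pv_fwdLoop_eq_bfsG (succ : List (String × List String)) (topo_rank : List (String × Int))
    (hi : Int) : ∀ (fuel : Nat) (fwd : PySem.Set String) (q : List String),
    pvFwdLoop succ topo_rank hi fuel fwd q = pvBfsG (pvExpandF succ topo_rank hi) fuel fwd q := by
  intro fuel
  induction fuel with
  | zero => intro fwd q; rfl
  | succ fuel ih =>
    intro fwd q
    cases q with
    | nil => rfl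
    | cons n q =>
      show pvFwdLoop succ topo_rank hi fuel
          (pvFwdStep succ topo_rank hi (fwd, q) n).1 (pvFwdStep succ topo_rank hi (fwd, q) n).2
        = pvBfsG (pvExpandF succ topo_rank hi) fuel
          ((pvExpandF succ topo_rank hi n).foldl pvPair (fwd, q)).1
          ((pvExpandF succ topo_rank hi n).foldl pvPair (fwd, q)).2
      rw [show pvFwdStep succ topo_rank hi (fwd, q) n
            = (pvExpandF succ topo_rank hi n).foldl pvPair (fwd, q) from
          pv_fwd_inner_eq topo_rank hi (pvAdj succ n) (fwd, q)]
      exact ih _ _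

theorem pv_revLoopA_eq_bfsG (pred : List (String × List String)) (fwd : PySem.Set String) :
    ∀ (fuel : Nat) (r : PySem.Set String) (q : List String),
    pvRevLoopA pred fwd fuel r q = pvBfsG (pvExpandR pred fwd) fuel r q := by
  intro fuel
  induction fuel with
  | zero => intro r q; rfl
  | succ fuel ih =>
    intro r q
    cases q with
    | nil => rfl
    | cons n q =>
      show pvRevLoopA pred fwd fuel
          (pvRevStepA pred fwd (r, q) n).1 (pvRevStepA pred fwd (r, q) n).2
        = pvBfsG (pvExpandR pred fwd) fuel
          ((pvExpandR pred fwd n).foldl pvPair (r, q)).1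
          ((pvExpandR pred fwd n).foldl pvPair (r, q)).2
      rw [show pvRevStepA pred fwd (r, q) n
            = (pvExpandR pred fwd n).foldl pvPair (r, q) from
          pv_rev_inner_eq fwd (pvAdj pred n) (r, q)]
      exact ih _ _

-- B's round is one block expansion of the whole current set
theorem pv_foldl_add_flatMap (g : String → List String) :
    ∀ (q : List String) (s : PySem.Set String),
      (q.flatMap g).foldl PySem.Set.add s = pvBlock g s q := by
  intro q
  induction q with
  | nil => intro s; rfl
  | cons n q ih =>
    intro s
    simp only [List.flatMap_cons, List.foldl_append, pvBlock, List.foldl_cons]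
    exact ih _

theorem pv_round_eq_block (g : String → List String) (s : PySem.Set String) :
    pvRound g s = pvBlock g s s := by
  simp only [pvRound, PySem.Set.union, PySem.Set.update]
  exact pv_foldl_add_flatMap g s s

-- expanding already-present elements changes nothing
theorem pv_foldl_add_of_subset : ∀ (l : List String) (s : PySem.Set String),
    (∀ x ∈ l, x ∈ s) → l.foldl PySem.Set.add s = s := by
  intro l
  induction l with
  | nil => intro s _; rfl
  | cons c l ih =>
    intro s hs
    simp only [List.foldl_cons, PySem.Set.add_of_mem (hs c List.mem_cons_self)]
    exact ih s (fun x hx => hs x (List.mem_cons_of_mem _ hx))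

theorem pv_block_sat (g : String → List String) : ∀ (d : List String) (r : List String),
    (∀ n ∈ d, ∀ c ∈ g n, c ∈ r) → pvBlock g r d = r := by
  intro d
  induction d with
  | nil => intro r _; rfl
  | cons n d ih =>
    intro r hr
    simp only [pvBlock, List.foldl_cons]
    rw [pv_foldl_add_of_subset (g n) r (hr n List.mem_cons_self)]
    exact ih r (fun m hm => hr m (List.mem_cons_of_mem _ hm))

theorem pv_block_append (g : String → List String) (r : List String) (d q : List String) :
    pvBlock g r (d ++ q) = pvBlock g (pvBlock g r d) q := by
  simp [pvBlock, List.foldl_append]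

-- processing a whole block of the queue: BFS advances by |q| steps and appends exactly the
-- fresh elements that pvBlock appends
theorem pv_block_shape (g : String → List String) :
    ∀ (q : List String) (r acc : List String) (fA : Nat), r.Nodup →
      ∃ T : List String,
        pvBlock g r q = r ++ T ∧
        pvBfsG g (q.length + fA) r (q ++ acc) = pvBfsG g fA (r ++ T) (acc ++ T) ∧
        (r ++ T).Nodup ∧
        (∀ x ∈ T, x ∉ r ∧ ∃ n ∈ q, x ∈ g n) ∧
        (∀ n ∈ q, ∀ c ∈ g n, c ∈ r ++ T) := by
  intro q
  induction q with
  | nil =>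
    intro r acc fA hnd
    exact ⟨[], by simp [pvBlock], by simp, by simpa using hnd, by simp, by simp⟩
  | cons n q ih =>
    intro r acc fA hnd
    obtain ⟨t, hp1, hp2, hp3, hp4, hp5⟩ := pv_pair_fold_shape (g n) r (q ++ acc)
    have hnd' : (r ++ t).Nodup :=
      pv_nodup_append r t hnd hp3 (fun x hx => (hp4 x hx).2)
    obtain ⟨T', hb1, hb2, hb3, hb4, hb5⟩ := ih (r ++ t) (acc ++ t) fA hnd'
    refine ⟨t ++ T', ?_, ?_, ?_, ?_, ?_⟩
    · show pvBlock g r (n :: q) = r ++ (t ++ T')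
      simp only [pvBlock, List.foldl_cons] at hb1 ⊢
      rw [hp2, hb1, List.append_assoc]
    · have hstep : pvBfsG g ((n :: q).length + fA) r ((n :: q) ++ acc)
          = pvBfsG g (q.length + fA) (r ++ t) ((q ++ acc) ++ t) := by
        have hl : (n :: q).length + fA = (q.length + fA) + 1 := by simp; omega
        rw [hl]
        show pvBfsG g (q.length + fA)
            ((g n).foldl pvPair (r, q ++ acc)).1 ((g n).foldl pvPair (r, q ++ acc)).2 = _
        rw [hp1]
      rw [hstep, List.append_assoc q acc t, hb2, ← List.append_assoc r t T',
        ← List.append_assoc acc t T']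
    · rw [List.append_assoc] at hb3
      exact hb3
    · intro x hx
      rcases List.mem_append.mp hx with hx | hx
      · exact ⟨(hp4 x hx).2, n, List.mem_cons_self, (hp4 x hx).1⟩
      · obtain ⟨hx1, m, hm, hx2⟩ := hb4 x hx
        exact ⟨fun hxr => hx1 (List.mem_append_left _ hxr), m, List.mem_cons_of_mem _ hm, hx2⟩
    · intro m hm c hc
      rcases List.mem_cons.mp hm with hm | hm
      · subst hm
        have := hp5 c hc
        rw [← List.append_assoc]
        exact List.mem_append_left _ this
      · have := hb5 m hm c hc
        rw [List.append_assoc] at this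
        exact this

-- the counting step: adding t fresh nodes shrinks the to-do count by at least |t|
theorem pv_count_drop (univ fwd t : List String) (ht : t.Nodup)
    (hsub : ∀ x ∈ t, x ∈ univ ∧ x ∉ fwd) :
    (univ.filter (fun c => ¬ c ∈ (fwd ++ t))).length + t.length ≤
      (univ.filter (fun c => ¬ c ∈ fwd)).length := by
  have h1 : univ.filter (fun c => ¬ c ∈ (fwd ++ t)) =
      (univ.filter (fun c => ¬ c ∈ fwd)).filter (fun c => ¬ c ∈ t) := by
    rw [List.filter_filter]
    apply List.filter_congr
    intro x _
    simp [List.mem_append, not_or, Bool.and_comm]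
  have h2 := List.length_eq_length_filter_add (l := univ.filter (fun c => ¬ c ∈ fwd))
      (fun c => decide (c ∈ t))
  have h3 : t.length ≤ ((univ.filter (fun c => ¬ c ∈ fwd)).filter (fun c => decide (c ∈ t))).length := by
    apply List.Subperm.length_le
    apply List.subperm_of_subset ht
    intro x hx
    rw [List.mem_filter, List.mem_filter]
    exact ⟨⟨(hsub x hx).1, by simpa using (hsub x hx).2⟩, by simpa using hx⟩
  have h4 : ((univ.filter (fun c => ¬ c ∈ fwd)).filter (fun c => ¬ c ∈ t)).length =
      ((univ.filter (fun c => ¬ c ∈ fwd)).filter (fun c => !(decide (c ∈ t)))).length := by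
    congr 1
    apply List.filter_congr
    intro x _
    simp
  rw [h1, h4]
  omega

-- Set.equal facts needed to step pvKfix
theorem pv_equal_self (s : PySem.Set String) : PySem.Set.equal s s = true := by
  simp [PySem.Set.equal, PySem.Set.issubset, PySem.Set.contains]

theorem pv_equal_append_false (r T : List String) (hne : T ≠ [])
    (hf : ∀ x ∈ T, x ∉ r) : PySem.Set.equal (r ++ T) r = false := by
  obtain ⟨x, hx⟩ := List.exists_mem_of_ne_nil T hne
  have hx1 : x ∈ r ++ T := List.mem_append_right _ hx
  have hx2 : x ∉ r := hf x hx
  simp only [PySem.Set.equal, PySem.Set.issubset, PySem.Set.contains, Bool.and_eq_false_iff]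
  left
  rw [List.all_eq_false]
  exact ⟨x, hx1, by simpa using hx2⟩

-- CORE: the canonical worklist BFS and B's round fixpoint compute the same list, given a
-- saturated processed prefix and enough fuel on both sides
theorem pv_core (g : String → List String) (U : List String) (seed : String)
    (HU : ∀ n x, x ∈ g n → x ∈ U) :
    ∀ (fB : Nat) (d q : List String) (fA : Nat),
      (d ++ q).Nodup →
      (∀ n ∈ d, ∀ c ∈ g n, c ∈ d ++ q) →
      (∀ x ∈ d ++ q, x ∈ seed :: U) →
      q.length + (U.filter (fun c => ¬ c ∈ (d ++ q))).length ≤ fA →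
      (seed :: U).dedup.length + 1 ≤ fB + (d ++ q).length →
      pvBfsG g fA (d ++ q) q = pvKfix g fB (d ++ q) := by
  intro fB
  induction fB with
  | zero =>
    intro d q fA hnd hsat huniv hCA hCB
    exfalso
    have hsub : (d ++ q) ⊆ (seed :: U).dedup := by
      intro x hx
      exact List.mem_dedup.mpr (huniv x hx)
    have := List.Subperm.length_le (List.subperm_of_subset hnd hsub)
    omega
  | succ fB ih =>
    intro d q fA hnd hsat huniv hCA hCB
    have hfa : q.length ≤ fA := by
      have := hCA; omega
    obtain ⟨T, hb1, hb2, hb3, hb4, hb5⟩ := pv_block_shape g q (d ++ q) [] (fA - q.length) hnd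
    have hround : pvRound g (d ++ q) = (d ++ q) ++ T := by
      rw [pv_round_eq_block, pv_block_append, pv_block_sat g d (d ++ q) hsat, hb1]
    have hbfs : pvBfsG g fA (d ++ q) q = pvBfsG g (fA - q.length) ((d ++ q) ++ T) T := by
      have h1 : fA = q.length + (fA - q.length) := by omega
      rw [h1]
      have := hb2
      simpa using this
    cases hT : T with
    | nil =>
      subst hT
      have hkfix : pvKfix g (fB + 1) (d ++ q) = d ++ q := by
        show (if PySem.Set.equal (pvRound g (d ++ q)) (d ++ q) then d ++ q
          else pvKfix g fB (pvRound g (d ++ q))) = d ++ q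
        rw [hround, List.append_nil, if_pos (pv_equal_self (d ++ q))]
      rw [hkfix, hbfs, List.append_nil, pv_bfsG_nil]
    | cons a T0 =>
      subst hT
      have hne : (a :: T0) ≠ ([] : List String) := by simp
      have hkfix : pvKfix g (fB + 1) (d ++ q) = pvKfix g fB ((d ++ q) ++ (a :: T0)) := by
        show (if PySem.Set.equal (pvRound g (d ++ q)) (d ++ q) then d ++ q
          else pvKfix g fB (pvRound g (d ++ q))) = _
        rw [hround, if_neg (by
          rw [pv_equal_append_false (d ++ q) (a :: T0) hne (fun x hx => (hb4 x hx).1)]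
          simp)]
      rw [hkfix, hbfs]
      have hTnd : (a :: T0).Nodup := (List.nodup_append.mp hb3).2.1
      have hcnt := pv_count_drop U (d ++ q) (a :: T0) hTnd (fun x hx =>
        ⟨by obtain ⟨_, n, _, hg⟩ := hb4 x hx; exact HU n x hg, (hb4 x hx).1⟩)
      have heq : pvBfsG g (fA - q.length) ((d ++ q) ++ (a :: T0)) (a :: T0)
          = pvKfix g fB ((d ++ q) ++ (a :: T0)) := by
        apply ih (d ++ q) (a :: T0) (fA - q.length) hb3
        · intro n hn c hc
          rcases List.mem_append.mp hn with hn | hn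
          · exact List.mem_append_left _ (hsat n hn c hc)
          · exact hb5 n hn c hc
        · intro x hx
          rcases List.mem_append.mp hx with hx | hx
          · exact huniv x hx
          · obtain ⟨_, n, _, hg⟩ := hb4 x hx
            exact List.mem_cons_of_mem _ (HU n x hg)
        · omega
        · simp only [List.length_append, List.length_cons] at hCB ⊢
          omega
      exact heq

-- at the seed, the ports' fuel is enough for both loops
theorem pv_bfs_eq_kfix (g : String → List String) (U : List String) (seed : String)
    (HU : ∀ n x, x ∈ g n → x ∈ U) :
    pvBfsG g (U.length + 1) [seed] [seed] = pvKfix g (U.length + 1) [seed] := by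
  have h := pv_core g U seed HU (U.length + 1) [] [seed] (U.length + 1)
  simp only [List.nil_append] at h
  apply h
  · exact List.nodup_singleton seed
  · intro n hn; cases hn
  · intro x hx; rw [List.mem_singleton] at hx; subst hx; exact List.mem_cons_self
  · show [seed].length + (U.filter (fun c => ¬ c ∈ ([seed] : List String))).length ≤ U.length + 1
    have h1 := List.length_filter_le (fun c => ¬ c ∈ ([seed] : List String)) U
    simp only [List.length_cons, List.length_nil]
    omega
  · have := List.Sublist.length_le (List.dedup_sublist (seed :: U))
    simp only [List.length_cons] at this ⊢
    omega

-- ===== VERDICT (by name: the statement is the Claim_ definition above) =====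
theorem collect_between_py_spec : Claim_equal_collect_between_py := by
  intro entry exit_node succ pred topo_rank _ _
  unfold Spec_collect_between_py collect_between_py collect_between_py_alt
  by_cases h1 : entry = exit_node
  · rw [if_pos h1, if_pos h1]
  · rw [if_neg h1, if_neg h1]
    by_cases h2 : PySem.Dict.getD (PySem.Dict.mk topo_rank) entry 0 >
        PySem.Dict.getD (PySem.Dict.mk topo_rank) exit_node 1000000000
    · rw [if_pos h2, if_pos h2]
    · rw [if_neg h2, if_neg h2]
      set hi := PySem.Dict.getD (PySem.Dict.mk topo_rank) exit_node 1000000000 with hhi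
      have hfwd : pvFwdLoop succ topo_rank hi ((succ.flatMap Prod.snd).length + 1) [entry] [entry]
          = pvKfix (pvExpandF succ topo_rank hi) ((succ.flatMap Prod.snd).length + 1) [entry] := by
        rw [pv_fwdLoop_eq_bfsG]
        exact pv_bfs_eq_kfix (pvExpandF succ topo_rank hi) (succ.flatMap Prod.snd) entry
          (fun n x hx => pv_adj_subset_flatMap succ n x (List.mem_of_mem_filter hx))
      rw [hfwd]
      set fwd := pvKfix (pvExpandF succ topo_rank hi) ((succ.flatMap Prod.snd).length + 1) [entry]
      by_cases h3 : exit_node ∈ fwd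
      · rw [if_pos h3, if_pos h3]
        rw [pv_revLoopA_eq_bfsG]
        exact pv_bfs_eq_kfix (pvExpandR pred fwd) (pred.flatMap Prod.snd) exit_node
          (fun n x hx => pv_adj_subset_flatMap pred n x (List.mem_of_mem_filter hx))
      · rw [if_neg h3, if_neg h3]
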